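-- pv_equiv track=rewrite | github.com/rcm72/insightviewer | source/InsightViewer/app/routes/ai_graph.py | _chunks_to_prompt
-- ===== SOURCE A (Python) =====
-- from typing import Any
--
-- def _chunks_to_prompt(chunks: list[dict[str, Any]], max_chars: int) -> str:
--     parts: list[str] = []
--     total = 0
--     for i, ch in enumerate(chunks, start=1):
--         cid = ch.get("id_rc") or f"chunk-{i}"
--         txt = str(ch.get("text") or "").strip()
--         if not txt:
--             continue
--         if len(txt) > 1400:
--             txt = txt[:1400].rstrip() + " ..."
--         block = f"[Chunk {i} | id_rc={cid}]\n{txt}\n"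
--         if total + len(block) > max_chars:
--             break
--         parts.append(block)
--         total += len(block)
--     return "\n".join(parts).strip()
-- ===== SOURCE B (Python) =====
-- from typing import Any
--
--
-- def _format_block(i: int, ch: dict[str, Any]) -> str | None:
--     cid = ch.get("id_rc") or f"chunk-{i}"
--     txt = str(ch.get("text") or "").strip()
--     if not txt:
--         return None
--     if len(txt) > 1400:
--         txt = txt[:1400].rstrip() + " ..."
--     return f"[Chunk {i} | id_rc={cid}]\n{txt}\n"
--
--
-- def _chunks_to_prompt(chunks: list[dict[str, Any]], max_chars: int) -> str:
--     # Stage 1: format every chunk (index counts skipped ones too).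
--     blocks = [b for i, ch in enumerate(chunks, start=1)
--               if (b := _format_block(i, ch)) is not None]
--     # Stage 2: prefix sums of the block lengths (strictly increasing).
--     prefix = []
--     s = 0
--     for b in blocks:
--         s += len(b)
--         prefix.append(s)
--     # Stage 3: binary search (bisect_right) for the largest k with prefix[k-1] <= max_chars.
--     lo, hi = 0, len(prefix)
--     while lo < hi:
--         mid = (lo + hi) // 2
--         if max_chars < prefix[mid]:
--             hi = mid
--         else:
--             lo = mid + 1
--     return "\n".join(blocks[:lo]).strip()
-- ===== Notes on version B (the rewrite author's own statement) =====
-- stated objective: alternative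
-- what changed: B is staged: it first materialises all formatted blocks, then builds the prefix-sum array of their lengths, and finds the cutoff by a hand-written binary search (bisect_right of max_chars in the strictly increasing prefix sums) instead of A's stateful loop with a running total and break; the prefix slice blocks[:lo] is then joined.
import Mathlib
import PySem

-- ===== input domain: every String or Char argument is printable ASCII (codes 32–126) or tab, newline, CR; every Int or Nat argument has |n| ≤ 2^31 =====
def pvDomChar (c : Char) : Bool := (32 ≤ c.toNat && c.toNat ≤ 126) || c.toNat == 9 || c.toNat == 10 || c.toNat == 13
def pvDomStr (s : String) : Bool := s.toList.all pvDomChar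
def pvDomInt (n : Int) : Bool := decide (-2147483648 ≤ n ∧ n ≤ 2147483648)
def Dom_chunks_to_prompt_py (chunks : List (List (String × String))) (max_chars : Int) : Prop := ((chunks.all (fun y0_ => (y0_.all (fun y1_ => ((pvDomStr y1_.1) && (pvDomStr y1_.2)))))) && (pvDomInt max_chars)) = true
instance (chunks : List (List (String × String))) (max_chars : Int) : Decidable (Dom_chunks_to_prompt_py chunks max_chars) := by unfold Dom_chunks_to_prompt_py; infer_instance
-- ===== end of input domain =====

-- B replaces A's stateful break-loop by staged passes: format all blocks, take prefix sums of their lengths, find the cutoff by binary search (bisect_right), join the kept prefix; a different algorithm for the cutoff, same overall cost.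


-- ===== PORT A =====
-- A's for-loop with break, transcribed as structural recursion carrying (index i, parts, total).
def pvAGo (max_chars : Int) : List (List (String × String)) → Int → List String → Int → List String
  | [], _, parts, _ => parts
  | ch :: rest, i, parts, total =>
    let cid0 := (PySem.Dict.mk ch).getD "id_rc" ""
    let cid := if cid0 = "" then "chunk-" ++ PySem.Int.toStr i else cid0
    let txt := PySem.Str.strip ((PySem.Dict.mk ch).getD "text" "")
    if txt = "" then pvAGo max_chars rest (i + 1) parts total
    else
      let txt2 := if 1400 < PySem.Str.len txt then
          PySem.Str.rstrip (PySem.Str.slice txt none (some 1400)) ++ " ..." else txt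
      let block := "[Chunk " ++ PySem.Int.toStr i ++ " | id_rc=" ++ cid ++ "]\n" ++ txt2 ++ "\n"
      if max_chars < total + PySem.Str.len block then parts
      else pvAGo max_chars rest (i + 1) (parts ++ [block]) (total + PySem.Str.len block)

def chunks_to_prompt_py (chunks : List (List (String × String))) (max_chars : Int) : String :=
  PySem.Str.strip (PySem.Str.join "\n" (pvAGo max_chars chunks 1 [] 0))

-- ===== PORT B =====
-- Source B's _format_block: the empty-skip and 1400-char truncation for one enumerated chunk.
def pvFmtBlock (i : Int) (ch : List (String × String)) : Option String :=
  let cid0 := (PySem.Dict.mk ch).getD "id_rc" ""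
  let cid := if cid0 = "" then "chunk-" ++ PySem.Int.toStr i else cid0
  let txt := PySem.Str.strip ((PySem.Dict.mk ch).getD "text" "")
  if txt = "" then none
  else
    let txt2 := if 1400 < PySem.Str.len txt then
        PySem.Str.rstrip (PySem.Str.slice txt none (some 1400)) ++ " ..." else txt
    some ("[Chunk " ++ PySem.Int.toStr i ++ " | id_rc=" ++ cid ++ "]\n" ++ txt2 ++ "\n")

-- Source B stage 2: prefix sums of the block lengths (running total s, appended each step)
def pvPrefix : List Int → Int → List Int
  | [], _ => []
  | x :: xs, s => (s + x) :: pvPrefix xs (s + x)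

-- Source B stage 3: the while-loop binary search (bisect_right); prefix[mid] is always in range,
-- List.getD with default 0 is exact there.
def pvBisect (a : List Int) (x : Int) (lo hi : Nat) : Nat :=
  if h : lo < hi then
    let mid := (lo + hi) / 2
    if x < a.getD mid 0 then pvBisect a x lo mid
    else pvBisect a x (mid + 1) hi
  else lo
termination_by hi - lo
decreasing_by all_goals omega

def chunks_to_prompt_py_alt (chunks : List (List (String × String))) (max_chars : Int) : String :=
  let blocks := (PySem.List.enumerate chunks 1).filterMap (fun p => pvFmtBlock p.1 p.2)
  let pre := pvPrefix (blocks.map PySem.Str.len) 0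
  let lo := pvBisect pre max_chars 0 pre.length
  PySem.Str.strip (PySem.Str.join "\n" (blocks.take lo))

-- ===== PRECONDITION & SPEC =====
def Spec_chunks_to_prompt_py (chunks : List (List (String × String))) (max_chars : Int) (out : String) : Prop := out = chunks_to_prompt_py_alt chunks max_chars
instance (chunks : List (List (String × String))) (max_chars : Int) (out : String) : Decidable (Spec_chunks_to_prompt_py chunks max_chars out) := by unfold Spec_chunks_to_prompt_py; infer_instance

-- ===== CLAIM (what is proved, stated in full; the proofs are below) =====
def Claim_equal_chunks_to_prompt_py : Prop := ∀ (chunks : List (List (String × String))) (max_chars : Int), Dom_chunks_to_prompt_py chunks max_chars → Spec_chunks_to_prompt_py chunks max_chars (chunks_to_prompt_py chunks max_chars)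

-- ===== LEMMAS AND PROOFS =====
-- proof-side names for the per-chunk values both ports compute
def pvCid (i : Int) (ch : List (String × String)) : String :=
  if (PySem.Dict.mk ch).getD "id_rc" "" = "" then "chunk-" ++ PySem.Int.toStr i
  else (PySem.Dict.mk ch).getD "id_rc" ""

def pvTxt2 (ch : List (String × String)) : String :=
  if 1400 < PySem.Str.len (PySem.Str.strip ((PySem.Dict.mk ch).getD "text" "")) then
    PySem.Str.rstrip (PySem.Str.slice (PySem.Str.strip ((PySem.Dict.mk ch).getD "text" "")) none (some 1400)) ++ " ..."
  else PySem.Str.strip ((PySem.Dict.mk ch).getD "text" "")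

def pvBlockOf (i : Int) (ch : List (String × String)) : String :=
  "[Chunk " ++ PySem.Int.toStr i ++ " | id_rc=" ++ pvCid i ch ++ "]\n" ++ pvTxt2 ch ++ "\n"

lemma pvFmtBlock_none {ch : List (String × String)} (i : Int)
    (h : PySem.Str.strip ((PySem.Dict.mk ch).getD "text" "") = "") :
    pvFmtBlock i ch = none := by
  simp only [pvFmtBlock]; rw [if_pos h]

lemma pvFmtBlock_some {ch : List (String × String)} (i : Int)
    (h : ¬ PySem.Str.strip ((PySem.Dict.mk ch).getD "text" "") = "") :
    pvFmtBlock i ch = some (pvBlockOf i ch) := by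
  simp only [pvFmtBlock, pvBlockOf, pvCid, pvTxt2]; rw [if_neg h]

lemma pvAGo_cons_skip (m : Int) (ch : List (String × String)) (rest : List (List (String × String)))
    (i : Int) (parts : List String) (total : Int)
    (h : PySem.Str.strip ((PySem.Dict.mk ch).getD "text" "") = "") :
    pvAGo m (ch :: rest) i parts total = pvAGo m rest (i + 1) parts total := by
  simp only [pvAGo]; rw [if_pos h]

lemma pvAGo_cons_keep (m : Int) (ch : List (String × String)) (rest : List (List (String × String)))
    (i : Int) (parts : List String) (total : Int)
    (h : ¬ PySem.Str.strip ((PySem.Dict.mk ch).getD "text" "") = "") :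
    pvAGo m (ch :: rest) i parts total =
      if m < total + PySem.Str.len (pvBlockOf i ch) then parts
      else pvAGo m rest (i + 1) (parts ++ [pvBlockOf i ch]) (total + PySem.Str.len (pvBlockOf i ch)) := by
  simp only [pvAGo, pvBlockOf, pvCid, pvTxt2]; rw [if_neg h]

-- A's loop from state (i, parts, total) returns parts ++ the blocks of the remaining chunks up to
-- the first whose cumulative length (started at total) exceeds m (takeWhile over the zip).
lemma pvAGo_eq (m : Int) : ∀ (xs : List (List (String × String))) (i : Int) (parts : List String) (total : Int),
    pvAGo m xs i parts total =
      parts ++ ((((PySem.List.enumerate xs i).filterMap (fun p => pvFmtBlock p.1 p.2)).zip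
        (pvPrefix (((PySem.List.enumerate xs i).filterMap (fun p => pvFmtBlock p.1 p.2)).map PySem.Str.len) total)).takeWhile
        (fun p => decide (p.2 ≤ m))).map Prod.fst := by
  intro xs
  induction xs with
  | nil => intro i parts total; simp [pvAGo, PySem.List.enumerate]
  | cons ch rest ih =>
    intro i parts total
    rw [PySem.List.enumerate_cons]
    by_cases htxt : PySem.Str.strip ((PySem.Dict.mk ch).getD "text" "") = ""
    · rw [pvAGo_cons_skip m ch rest i parts total htxt, ih]
      simp only [List.filterMap_cons, pvFmtBlock_none i htxt]
    · rw [pvAGo_cons_keep m ch rest i parts total htxt]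
      simp only [List.filterMap_cons, pvFmtBlock_some i htxt]
      simp only [List.map_cons, pvPrefix, List.zip_cons_cons, List.takeWhile_cons]
      by_cases hle : total + PySem.Str.len (pvBlockOf i ch) ≤ m
      · rw [if_neg (by omega), ih]
        simp only [PySem.Str.len_eq, String.length_toList] at hle
        simp [hle]
      · rw [if_pos (by omega)]
        simp only [PySem.Str.len_eq, String.length_toList] at hle
        simp [hle]

-- takeWhile on the zip, with the predicate only looking at the second component, is a take of the
-- first list by the length of the takeWhile on the second (when both lists have equal length).
lemma zip_takeWhile_snd (m : Int) : ∀ (bs : List String) (ss : List Int), bs.length = ss.length →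
    ((bs.zip ss).takeWhile (fun p => decide (p.2 ≤ m))).map Prod.fst =
      bs.take ((ss.takeWhile (fun s => decide (s ≤ m))).length) := by
  intro bs
  induction bs with
  | nil => intro ss _; simp
  | cons b bs ih =>
    intro ss hlen
    cases ss with
    | nil => simp at hlen
    | cons s ss =>
      simp only [List.zip_cons_cons, List.takeWhile_cons]
      by_cases hs : s ≤ m
      · simp only [hs, decide_true, if_true, List.map_cons, List.length_cons, List.take_succ_cons]
        rw [ih ss (by simpa using hlen)]
      · simp [hs]

-- every element of pvPrefix xs s is ≥ s when all xs are nonnegative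
lemma pvPrefix_mem_ge : ∀ (xs : List Int) (s y : Int), (∀ x ∈ xs, 0 ≤ x) → y ∈ pvPrefix xs s → s ≤ y := by
  intro xs
  induction xs with
  | nil => intro s y _ hy; simp [pvPrefix] at hy
  | cons x xs ih =>
    intro s y hnn hy
    simp only [pvPrefix, List.mem_cons] at hy
    have hx : 0 ≤ x := hnn x (by simp)
    rcases hy with rfl | hy
    · omega
    · have := ih (s + x) y (fun z hz => hnn z (by simp [hz])) hy; omega

lemma pvPrefix_sorted : ∀ (xs : List Int) (s : Int), (∀ x ∈ xs, 0 ≤ x) →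
    (pvPrefix xs s).Pairwise (· ≤ ·) := by
  intro xs
  induction xs with
  | nil => intro s _; simp [pvPrefix]
  | cons x xs ih =>
    intro s hnn
    simp only [pvPrefix]
    refine List.Pairwise.cons ?_ (ih (s + x) (fun z hz => hnn z (by simp [hz])))
    intro y hy
    exact pvPrefix_mem_ge xs (s + x) y (fun z hz => hnn z (by simp [hz])) hy

lemma pvPrefix_length : ∀ (xs : List Int) (s : Int), (pvPrefix xs s).length = xs.length := by
  intro xs; induction xs with
  | nil => intro s; rfl
  | cons x xs ih => intro s; simp [pvPrefix, ih]

-- binary-search invariant: if k splits indices of a into (≤ x) below and (> x) from k on,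
-- pvBisect converges to k from any bracket lo ≤ k ≤ hi
lemma pvBisect_eq_of_inv (a : List Int) (x : Int) (k : Nat) :
    ∀ (lo hi : Nat), lo ≤ k → k ≤ hi →
      (∀ i, lo ≤ i → i < hi → (a.getD i 0 ≤ x ↔ i < k)) →
      pvBisect a x lo hi = k := by
  intro lo hi
  induction hlh : hi - lo using Nat.strong_induction_on generalizing lo hi with
  | _ n ihn =>
    intro hlo hhi hinv
    rw [pvBisect]
    by_cases h : lo < hi
    · rw [dif_pos h]
      have hmid1 : lo ≤ (lo + hi) / 2 := by omega
      have hmid2 : (lo + hi) / 2 < hi := by omega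
      by_cases hx : x < a.getD ((lo + hi) / 2) 0
      · rw [if_pos hx]
        have hk : k ≤ (lo + hi) / 2 := by
          by_contra hc
          have := (hinv _ hmid1 hmid2).mpr (by omega)
          omega
        exact ihn (((lo + hi) / 2) - lo) (by omega) lo ((lo + hi) / 2) rfl hlo hk
          (fun i h1 h2 => hinv i h1 (by omega))
      · rw [if_neg hx]
        have hk : (lo + hi) / 2 < k := (hinv _ hmid1 hmid2).mp (by omega)
        exact ihn (hi - ((lo + hi) / 2 + 1)) (by omega) ((lo + hi) / 2 + 1) hi rfl (by omega) hhi
          (fun i h1 h2 => hinv i (by omega) h2)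
    · rw [dif_neg h]; omega

lemma takeWhile_length_le {α : Type} (p : α → Bool) (l : List α) :
    (l.takeWhile p).length ≤ l.length :=
  List.Sublist.length_le (List.takeWhile_sublist p)

-- on a ≤-sorted list, the takeWhile-(≤ x) length splits indices as the invariant requires
lemma sorted_takeWhile_split (x : Int) : ∀ (a : List Int), a.Pairwise (· ≤ ·) →
    ∀ i, i < a.length → (a.getD i 0 ≤ x ↔ i < (a.takeWhile (fun s => decide (s ≤ x))).length) := by
  intro a
  induction a with
  | nil => intro _ i hi; simp at hi
  | cons y ys ih =>
    intro hsort i hi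
    have hys : ys.Pairwise (· ≤ ·) := hsort.of_cons
    cases i with
    | zero =>
      simp only [List.getD_cons_zero, List.takeWhile_cons]
      by_cases hy : y ≤ x
      · simp [hy]
      · simp [hy]
    | succ j =>
      have hj : j < ys.length := by simpa using hi
      rw [List.getD_cons_succ]
      simp only [List.takeWhile_cons]
      by_cases hy : y ≤ x
      · simp only [hy, decide_true, if_true, List.length_cons]
        rw [ih hys j hj]; omega
      · -- y > x, and y ≤ every later element, so ys.getD j 0 > x
        have hle : y ≤ ys.getD j 0 := by
          have := List.pairwise_cons.mp hsort |>.1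
          have hmem : ys.getD j 0 ∈ ys := by
            rw [List.getD_eq_getElem?_getD, List.getElem?_eq_getElem hj]
            exact List.getElem_mem hj
          exact this _ hmem
        have hgt : ¬ (ys.getD j 0 ≤ x) := by omega
        rw [List.getD_eq_getElem?_getD] at hgt
        simp [hy]
        omega

-- ===== VERDICT (by name: the statement is the Claim_ definition above) =====
theorem chunks_to_prompt_py_spec : Claim_equal_chunks_to_prompt_py := by
  intro chunks max_chars _
  unfold Spec_chunks_to_prompt_py chunks_to_prompt_py chunks_to_prompt_py_alt
  rw [pvAGo_eq]
  simp only [List.nil_append]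
  set blocks := (PySem.List.enumerate chunks 1).filterMap (fun p => pvFmtBlock p.1 p.2) with hb
  set lens := blocks.map PySem.Str.len with hl
  have hnn : ∀ x ∈ lens, (0:Int) ≤ x := by
    intro x hx
    rw [hl] at hx
    obtain ⟨b, _, rfl⟩ := List.mem_map.mp hx
    simp [PySem.Str.len_eq]
  have hsort := pvPrefix_sorted lens 0 hnn
  have hlen : blocks.length = (pvPrefix lens 0).length := by
    rw [pvPrefix_length, hl, List.length_map]
  rw [zip_takeWhile_snd max_chars blocks (pvPrefix lens 0) hlen]
  rw [(pvBisect_eq_of_inv (pvPrefix lens 0) max_chars _ 0 (pvPrefix lens 0).length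
    (Nat.zero_le _) (takeWhile_length_le _ _)
    (fun i _ h2 => sorted_takeWhile_split max_chars (pvPrefix lens 0) hsort i h2))]
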